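-- pv_equiv track=rewrite | github.com/wtain/LeetCodePython | DataStructures/Basic/Arrays/BeautifulArray.py | is_beautiful
-- ===== SOURCE A (Python) =====
-- from typing import List
--
-- def is_beautiful(arr: List[int]) -> bool:
--     n = len(arr)
--     if sum(arr) != n * (n+1) // 2:
--         return False
--     for i in range(n-2):
--         for j in range(i+2, n):
--             for k in range(i+1, j):
--                 if 2*arr[k] == arr[i] + arr[j]:
--                     return False
--     return True
-- ===== SOURCE B (Python) =====
-- from typing import List
--
-- def is_beautiful(arr: List[int]) -> bool:
--     n = len(arr)
--     if sum(arr) != n * (n + 1) // 2: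
--         return False
--     left = set()
--     for k in range(n):
--         target = 2 * arr[k]
--         for j in range(k + 1, n):
--             if target - arr[j] in left:
--                 return False
--         left.add(arr[k])
--     return True
-- ===== Notes on version B (the rewrite author's own statement) =====
-- stated objective: alternative
-- what changed: Instead of scanning all triples i<k<j (three nested loops), B fixes the middle index k and keeps a hash set of the elements left of k, finding a triple by checking 2*arr[k]-arr[j] against that set for each j>k; the timing inputs almost always fail the sum pre-check, where both are linear, so no speed is claimed.
import Mathlib
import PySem

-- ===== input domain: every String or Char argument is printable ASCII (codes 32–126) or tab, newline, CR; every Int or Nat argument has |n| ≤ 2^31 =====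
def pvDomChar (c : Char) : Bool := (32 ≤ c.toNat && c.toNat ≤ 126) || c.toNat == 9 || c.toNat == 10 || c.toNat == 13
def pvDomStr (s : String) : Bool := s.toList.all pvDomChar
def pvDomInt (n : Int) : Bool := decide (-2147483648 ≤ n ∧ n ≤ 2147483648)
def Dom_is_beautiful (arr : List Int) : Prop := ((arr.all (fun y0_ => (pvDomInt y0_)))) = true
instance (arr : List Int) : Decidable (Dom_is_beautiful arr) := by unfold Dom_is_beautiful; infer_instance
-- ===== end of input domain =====

-- B replaces A's cubic scan over all triples i<k<j by fixing the middle index k and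
-- looking up 2*arr[k]-arr[j] in a hash set of the elements left of k (objective: alternative algorithm).

-- arr[i] for an index the Python code only uses in range (shared indexing helper)
def pvGet (arr : List Int) (i : Int) : Int := PySem.List.pyGetD arr i 0

-- ===== PORT A =====
def is_beautiful (arr : List Int) : Bool :=
  let n : Int := PySem.List.len arr
  if arr.sum ≠ PySem.Int.floordiv (n * (n + 1)) 2 then false
  else
    -- for i / for j / for k with 'return False' on a hit, then 'return True'
    !((PySem.List.pyRange 0 (n - 2) 1).any fun i =>
      (PySem.List.pyRange (i + 2) n 1).any fun j =>
        (PySem.List.pyRange (i + 1) j 1).any fun k =>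
          2 * pvGet arr k == pvGet arr i + pvGet arr j)

-- ===== PORT B =====
-- one iteration of B's outer loop: state = (left set, found flag)
def pvAltStep (arr : List Int) (n : Int) (st : PySem.Set Int × Bool) (k : Int) :
    PySem.Set Int × Bool :=
  let target := 2 * pvGet arr k
  let found := st.2 ||
    ((PySem.List.pyRange (k + 1) n 1).any fun j =>
      PySem.Set.contains st.1 (target - pvGet arr j))
  (PySem.Set.add st.1 (pvGet arr k), found)

def is_beautiful_alt (arr : List Int) : Bool :=
  let n : Int := PySem.List.len arr
  if arr.sum ≠ PySem.Int.floordiv (n * (n + 1)) 2 then false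
  else
    !((PySem.List.pyRange 0 n 1).foldl (pvAltStep arr n)
        ((PySem.Set.empty : PySem.Set Int), false)).2

-- ===== PRECONDITION & SPEC =====
def Spec_is_beautiful (arr : List Int) (out : Bool) : Prop := out = is_beautiful_alt arr
instance (arr : List Int) (out : Bool) : Decidable (Spec_is_beautiful arr out) := by unfold Spec_is_beautiful; infer_instance

-- ===== CLAIM (what is proved, stated in full; the proofs are below) =====
def Claim_equal_is_beautiful : Prop := ∀ (arr : List Int), Dom_is_beautiful arr → Spec_is_beautiful arr (is_beautiful arr)

-- ===== LEMMAS AND PROOFS =====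

-- "there is a triple i < k < j with middle index k ≥ a and 2*arr[k] = arr[i] + arr[j]"
def pvTripleFrom (arr : List Int) (n a : Int) : Prop :=
  ∃ i k j : Int, 0 ≤ i ∧ i < k ∧ a ≤ k ∧ k < j ∧ j < n ∧
    2 * pvGet arr k = pvGet arr i + pvGet arr j

-- loop invariant for B's fold: the flag ends true iff it started true or a triple
-- with middle index ≥ a exists, provided the set holds exactly the elements left of a
theorem pvAlt_fold_inv (arr : List Int) (n : Int) :
    ∀ (m : Nat) (a : Int) (s : PySem.Set Int) (b : Bool),
      0 ≤ a → m = (n - a).toNat →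
      (∀ x : Int, x ∈ s ↔ ∃ i : Int, 0 ≤ i ∧ i < a ∧ pvGet arr i = x) →
      ((((PySem.List.pyRange a n 1).foldl (pvAltStep arr n) (s, b)).2 = true) ↔
        (b = true ∨ pvTripleFrom arr n a)) := by
  intro m
  induction m with
  | zero =>
    intro a s b _ hm _
    have hna : n ≤ a := by omega
    rw [PySem.List.pyRange_one_eq_nil hna]
    simp only [List.foldl_nil]
    constructor
    · intro h; exact Or.inl h
    · rintro (h | ⟨i, k, j, h0, hik, hak, hkj, hjn, _⟩)
      · exact h
      · omega
  | succ m ih =>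
    intro a s b ha0 hm hs
    have han : a < n := by omega
    rw [PySem.List.pyRange_one_cons han]
    simp only [List.foldl_cons]
    have hstep : pvAltStep arr n (s, b) a =
        (PySem.Set.add s (pvGet arr a),
         b || ((PySem.List.pyRange (a + 1) n 1).any fun j =>
           PySem.Set.contains s (2 * pvGet arr a - pvGet arr j))) := rfl
    rw [hstep]
    rw [ih (a + 1) (PySem.Set.add s (pvGet arr a)) _ (by omega) (by omega) ?_]
    · constructor
      · rintro (hb | htr)
        · rcases Bool.or_eq_true_iff.mp hb with hb' | hany
          · exact Or.inl hb'
          · right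
            rcases List.any_eq_true.mp hany with ⟨j, hjmem, hcj⟩
            rcases (PySem.List.mem_pyRange_one).mp hjmem with ⟨hj1, hj2⟩
            have hx := (hs _).mp ((PySem.Set.contains_iff _ _).mp hcj)
            rcases hx with ⟨i, hi0, hia, hieq⟩
            exact ⟨i, a, j, hi0, by omega, by omega, by omega, hj2, by omega⟩
        · rcases htr with ⟨i, k, j, h0, hik, hak, hkj, hjn, heq⟩
          exact Or.inr ⟨i, k, j, h0, hik, by omega, hkj, hjn, heq⟩
      · rintro (hb | ⟨i, k, j, h0, hik, hak, hkj, hjn, heq⟩)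
        · exact Or.inl (by simp [hb])
        · by_cases hk : a + 1 ≤ k
          · exact Or.inr ⟨i, k, j, h0, hik, hk, hkj, hjn, heq⟩
          · have hka : k = a := by omega
            subst hka
            left
            apply Bool.or_eq_true_iff.mpr
            right
            apply List.any_eq_true.mpr
            refine ⟨j, (PySem.List.mem_pyRange_one).mpr ⟨by omega, hjn⟩, ?_⟩
            exact (PySem.Set.contains_iff _ _).mpr
              ((hs _).mpr ⟨i, h0, by omega, by omega⟩)
    · intro x
      rw [PySem.Set.mem_add]
      constructor
      · rintro (hx | hx)
        · rcases (hs x).mp hx with ⟨i, hi0, hia, hie⟩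
          exact ⟨i, hi0, by omega, hie⟩
        · exact ⟨a, by omega, by omega, hx.symm⟩
      · rintro ⟨i, hi0, hia1, hie⟩
        by_cases hia : i < a
        · exact Or.inl ((hs x).mpr ⟨i, hi0, hia, hie⟩)
        · have : i = a := by omega
          subst this
          exact Or.inr hie.symm

-- A's nested scan finds a triple iff one exists at all (with middle index ≥ 0)
theorem pvA_any_iff (arr : List Int) (n : Int) :
    (((PySem.List.pyRange 0 (n - 2) 1).any fun i =>
      (PySem.List.pyRange (i + 2) n 1).any fun j =>
        (PySem.List.pyRange (i + 1) j 1).any fun k =>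
          2 * pvGet arr k == pvGet arr i + pvGet arr j) = true) ↔
      pvTripleFrom arr n 0 := by
  simp only [List.any_eq_true, PySem.List.mem_pyRange_one, beq_iff_eq]
  constructor
  · rintro ⟨i, ⟨hi0, hi2⟩, j, ⟨hj1, hj2⟩, k, ⟨hk1, hk2⟩, heq⟩
    exact ⟨i, k, j, hi0, by omega, by omega, hk2, hj2, heq⟩
  · rintro ⟨i, k, j, h0, hik, _, hkj, hjn, heq⟩
    exact ⟨i, ⟨h0, by omega⟩, j, ⟨by omega, hjn⟩, k, ⟨by omega, hkj⟩, heq⟩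

-- ===== VERDICT (by name: the statement is the Claim_ definition above) =====
theorem is_beautiful_spec : Claim_equal_is_beautiful := by
  intro arr _
  unfold Spec_is_beautiful is_beautiful is_beautiful_alt
  by_cases h : arr.sum ≠ PySem.Int.floordiv ((PySem.List.len arr) * (PySem.List.len arr + 1)) 2
  · simp only [if_pos h]
  · simp only [if_neg h, Bool.not_inj_iff]
    rw [Bool.eq_iff_iff, pvA_any_iff arr (PySem.List.len arr),
      pvAlt_fold_inv arr (PySem.List.len arr) ((PySem.List.len arr - 0).toNat) 0
        PySem.Set.empty false le_rfl rfl ?_]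
    · simp
    · intro x
      constructor
      · intro hx; exact absurd hx (by simp [PySem.Set.empty])
      · rintro ⟨i, hi0, hia, _⟩; omega
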